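-- pv_equiv track=rewrite | github.com/etvan13/YouJin | terminal/utils/coordinate.py | strCoord_conv
-- ===== SOURCE A (Python) =====
-- def strCoord_conv(number):
--     number %= (60 ** 5)  # Modulo to get the value within the current universe
--
--     digits = []
--     while number > 0:
--         digits.append(number % 60)
--         number //= 60
--
--     while len(digits) < 5:
--         digits.append(0)
--
--     return ' '.join(str(d) for d in digits)
-- ===== SOURCE B (Python) =====
-- def strCoord_conv(number):
--     def go(n, k):
--         if k == 1:
--             return str(n % 60)
--         return str(n % 60) + ' ' + go(n // 60, k - 1)
--     return go(number % (60 ** 5), 5)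
-- ===== Notes on version B (the rewrite author's own statement) =====
-- stated objective: simpler
-- what changed: Replaces A's two staged loops (peel-until-zero into a list, then zero-pad, then join) with one fixed-depth recursion that concatenates each digit string directly, building no list and needing no padding or join.
import Mathlib
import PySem

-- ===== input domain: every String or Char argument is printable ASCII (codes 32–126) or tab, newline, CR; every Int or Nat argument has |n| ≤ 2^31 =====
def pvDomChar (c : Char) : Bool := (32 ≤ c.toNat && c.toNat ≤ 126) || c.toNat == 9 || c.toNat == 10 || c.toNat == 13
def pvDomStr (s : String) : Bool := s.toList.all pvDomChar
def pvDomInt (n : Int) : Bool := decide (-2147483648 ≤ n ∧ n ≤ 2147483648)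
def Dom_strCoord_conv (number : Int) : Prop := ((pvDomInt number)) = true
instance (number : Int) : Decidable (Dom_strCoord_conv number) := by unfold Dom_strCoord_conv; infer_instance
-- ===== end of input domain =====

-- B replaces A's peel-until-zero loop, zero-padding loop and join over an intermediate list by
-- one fixed-depth recursion that concatenates each digit string directly (objective: simpler).

-- ===== PORT A =====
-- the `while number > 0` peel loop of A
def pvPeel (n : Int) : List Int :=
  if n > 0 then PySem.Int.mod n 60 :: pvPeel (PySem.Int.floordiv n 60) else []
termination_by n.toNat
decreasing_by
  have h60 : PySem.Int.floordiv n 60 = n / 60 := PySem.Int.floordiv_eq_ediv_of_pos (by norm_num)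
  rw [h60]; omega

-- the `while len(digits) < 5: digits.append(0)` padding loop of A
def pvPad (ds : List Int) : List Int :=
  if h : ds.length < 5 then pvPad (ds ++ [0]) else ds
termination_by 5 - ds.length
decreasing_by simp; omega

def strCoord_conv (number : Int) : String :=
  PySem.Str.join " " ((pvPad (pvPeel (PySem.Int.mod number (60 ^ 5)))).map PySem.Int.toStr)

-- ===== PORT B =====
-- the inner `go(n, k)` recursion of B (the k = 0 branch is unreachable fuel totalisation)
def pvGo (n : Int) : Nat → String
  | 0 => ""
  | Nat.succ k =>
      if k = 0 then PySem.Int.toStr (PySem.Int.mod n 60)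
      else PySem.Int.toStr (PySem.Int.mod n 60) ++ " " ++ pvGo (PySem.Int.floordiv n 60) k

def strCoord_conv_alt (number : Int) : String :=
  pvGo (PySem.Int.mod number (60 ^ 5)) 5

-- ===== PRECONDITION & SPEC =====
def Spec_strCoord_conv (number : Int) (out : String) : Prop := out = strCoord_conv_alt number
instance (number : Int) (out : String) : Decidable (Spec_strCoord_conv number out) := by unfold Spec_strCoord_conv; infer_instance

-- ===== CLAIM (what is proved, stated in full; the proofs are below) =====
def Claim_equal_strCoord_conv : Prop := ∀ (number : Int), Dom_strCoord_conv number → Spec_strCoord_conv number (strCoord_conv number)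

-- ===== LEMMAS AND PROOFS =====

theorem pvPad_eq (ds : List Int) : pvPad ds = ds ++ List.replicate (5 - ds.length) 0 := by
  fun_induction pvPad ds with
  | case1 ds h ih =>
      rw [ih]
      have : 5 - ds.length = (5 - (ds ++ [0]).length) + 1 := by simp; omega
      rw [this, List.replicate_succ, List.append_assoc]
      rfl
  | case2 ds h =>
      have : 5 - ds.length = 0 := by omega
      simp [this]

theorem pvPeel_key (k : Nat) (n : Int) (h0 : 0 ≤ n) (hk : n < 60 ^ k) :
    pvPeel n ++ List.replicate (k - (pvPeel n).length) 0
      = (List.range k).map (fun i => (n / 60 ^ i) % 60) := by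
  induction k generalizing n with
  | zero =>
      have hn : n = 0 := by omega
      subst hn
      rw [pvPeel]
      simp
  | succ k ih =>
      by_cases hpos : n > 0
      · rw [pvPeel, if_pos hpos]
        have hfd : PySem.Int.floordiv n 60 = n / 60 := PySem.Int.floordiv_eq_ediv_of_pos (by norm_num)
        have hmd : PySem.Int.mod n 60 = n % 60 := PySem.Int.mod_eq_emod_of_pos (by norm_num)
        have hdn : 0 ≤ n / 60 := Int.ediv_nonneg h0 (by norm_num)
        have hdlt : n / 60 < 60 ^ k := by
          have h1 : n < 60 ^ k * 60 := by rw [pow_succ] at hk; linarith [hk]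
          exact (Int.ediv_lt_iff_lt_mul (by norm_num)).mpr h1
        have ihr := ih (n / 60) hdn hdlt
        rw [hfd, hmd, List.range_succ_eq_map]
        simp only [List.map_cons, List.map_map, pow_zero, Int.ediv_one]
        have hcomp : ((fun i => (n / 60 ^ i) % 60) ∘ (fun i => i + 1))
            = (fun i => ((n / 60) / 60 ^ i) % 60) := by
          funext i
          simp only [Function.comp]
          rw [pow_succ', ← Int.ediv_ediv_of_nonneg (by norm_num : (0:Int) ≤ 60)]
        rw [hcomp, ← ihr]
        simp only [List.cons_append, List.length_cons]
        have hlen : k + 1 - ((pvPeel (n / 60)).length + 1) = k - (pvPeel (n / 60)).length := by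
          omega
        rw [hlen]
      · have hn : n = 0 := by omega
        subst hn
        rw [pvPeel, if_neg hpos]
        simp [List.map_const']

-- String-level join step: sep.join on a list of length ≥ 2
theorem joinc (x : String) (ys : List String) (y : String) :
    PySem.Str.join " " (x :: y :: ys) = x ++ " " ++ PySem.Str.join " " (y :: ys) := by
  unfold PySem.Str.join
  rw [List.map_cons, List.map_cons, PySem.Chars.join_cons_cons,
    String.ofList_append, String.ofList_append, String.ofList_toList]
  rfl

-- B's recursion equals the join of the positional digit strings, for any depth k+1
theorem pvGo_join (k : Nat) (n : Int) :
    pvGo n (k + 1)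
      = PySem.Str.join " "
          ((List.range (k + 1)).map (fun i => PySem.Int.toStr ((n / 60 ^ i) % 60))) := by
  induction k generalizing n with
  | zero =>
      have hmd : PySem.Int.mod n 60 = n % 60 := PySem.Int.mod_eq_emod_of_pos (by norm_num)
      simp [pvGo, PySem.Str.join, PySem.Int.toStr, List.range_one]
  | succ k ih =>
      have hmd : PySem.Int.mod n 60 = n % 60 := PySem.Int.mod_eq_emod_of_pos (by norm_num)
      have hfd : PySem.Int.floordiv n 60 = n / 60 := PySem.Int.floordiv_eq_ediv_of_pos (by norm_num)
      have hcomp : (fun i => PySem.Int.toStr ((n / 60 ^ i) % 60)) ∘ (fun i => i + 1)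
          = fun i => PySem.Int.toStr (((n / 60) / 60 ^ i) % 60) := by
        funext i
        simp only [Function.comp]
        rw [pow_succ', ← Int.ediv_ediv_of_nonneg (by norm_num : (0:Int) ≤ 60)]
      rw [show pvGo n (k + 1 + 1)
            = PySem.Int.toStr (PySem.Int.mod n 60) ++ " " ++ pvGo (PySem.Int.floordiv n 60) (k + 1)
          from rfl,
        ih, hmd, hfd]
      conv_rhs => rw [List.range_succ_eq_map]
      rw [List.map_cons, List.map_map, hcomp]
      obtain ⟨z, zs, hz⟩ :
          ∃ z zs, (List.range (k + 1)).map
              (fun i => PySem.Int.toStr (((n / 60) / 60 ^ i) % 60)) = z :: zs :=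
        ⟨_, _, by rw [List.range_succ_eq_map, List.map_cons]⟩
      rw [hz, joinc, ← hz]
      simp

-- ===== VERDICT (by name: the statement is the Claim_ definition above) =====
theorem strCoord_conv_spec : Claim_equal_strCoord_conv := by
  intro number _
  unfold Spec_strCoord_conv strCoord_conv strCoord_conv_alt
  have hmd : PySem.Int.mod number (60 ^ 5) = number % (60 ^ 5) :=
    PySem.Int.mod_eq_emod_of_pos (by norm_num)
  have h0 : 0 ≤ PySem.Int.mod number (60 ^ 5) := by
    rw [hmd]; exact Int.emod_nonneg _ (by norm_num)
  have h5 : PySem.Int.mod number (60 ^ 5) < 60 ^ 5 := by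
    rw [hmd]; exact Int.emod_lt_of_pos _ (by norm_num)
  rw [pvPad_eq, pvPeel_key 5 _ h0 h5, pvGo_join 4]
  simp [List.map_map, Function.comp_def]
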